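-- pv_equiv track=rewrite | github.com/miray-mustafov/DSA | recursion/capitalize_words.py | capitalizeWords
-- ===== SOURCE A (Python) =====
-- def capitalizeWords(arr):
--     word = ""
--     try:
--         for l in arr[0]:
--             word = word + l.upper()
--     except IndexError:
--         return []
--     return [word] + capitalizeWords(arr[1:])
-- ===== SOURCE B (Python) =====
-- def capitalizeWords(arr):
--     res = []
--     for word in arr:
--         w = ""
--         for l in word:
--             w = w + l.upper()
--         res.append(w)
--     return res
-- ===== Notes on version B (the rewrite author's own statement) =====
-- stated objective: faster
-- what changed: Replaces A's slice-per-step recursion with try/except IndexError base case by a single iterative loop with a result accumulator; the per-character uppercasing loop is kept.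
import Mathlib
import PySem

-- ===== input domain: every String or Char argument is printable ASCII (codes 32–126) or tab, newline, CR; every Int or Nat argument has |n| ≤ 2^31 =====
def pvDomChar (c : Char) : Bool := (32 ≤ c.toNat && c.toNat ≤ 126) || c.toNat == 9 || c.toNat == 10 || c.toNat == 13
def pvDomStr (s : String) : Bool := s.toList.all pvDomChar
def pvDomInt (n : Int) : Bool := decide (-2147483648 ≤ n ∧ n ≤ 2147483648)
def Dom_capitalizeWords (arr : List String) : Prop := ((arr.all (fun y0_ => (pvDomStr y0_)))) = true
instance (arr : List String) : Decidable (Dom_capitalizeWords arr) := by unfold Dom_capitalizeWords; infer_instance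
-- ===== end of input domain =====

-- B replaces A's slice-per-step recursion (with try/except base case) by one iterative
-- loop with a result accumulator; the per-character uppercasing loop is kept.

-- ===== PORT A =====
-- inner loop: word = ""; for l in arr[0]: word = word + l.upper()
def pvCapWordA (s : String) : String :=
  s.toList.foldl (fun word l => word ++ PySem.Str.upper (String.mk [l])) ""

-- empty arr: arr[0] raises IndexError, caught → return []; else [word] + capitalizeWords(arr[1:])
def capitalizeWords (arr : List String) : List String :=
  match arr with
  | [] => []
  | s :: rest => [pvCapWordA s] ++ capitalizeWords rest

-- ===== PORT B =====
-- inner loop of Source B: w = ""; for l in word: w = w + l.upper()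
def pvCapWordB (word : String) : String :=
  word.toList.foldl (fun w l => w ++ PySem.Str.upper (String.mk [l])) ""

-- res = []; for word in arr: res.append(capitalized word); return res
def capitalizeWords_alt (arr : List String) : List String :=
  arr.foldl (fun res word => res ++ [pvCapWordB word]) []

-- ===== PRECONDITION & SPEC =====
def Spec_capitalizeWords (arr : List String) (out : List String) : Prop := out = capitalizeWords_alt arr
instance (arr : List String) (out : List String) : Decidable (Spec_capitalizeWords arr out) := by unfold Spec_capitalizeWords; infer_instance

-- ===== CLAIM (what is proved, stated in full; the proofs are below) =====
def Claim_equal_capitalizeWords : Prop := ∀ (arr : List String), Dom_capitalizeWords arr → Spec_capitalizeWords arr (capitalizeWords arr)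

-- ===== LEMMAS AND PROOFS =====
theorem pvCapWordB_eq (s : String) : pvCapWordB s = pvCapWordA s := rfl

theorem alt_foldl_acc (arr : List String) (res : List String) :
    arr.foldl (fun res word => res ++ [pvCapWordB word]) res
      = res ++ arr.map pvCapWordB := by
  induction arr generalizing res with
  | nil => simp
  | cons s rest ih => simp [List.foldl, ih]

theorem capA_eq_map (arr : List String) : capitalizeWords arr = arr.map pvCapWordA := by
  induction arr with
  | nil => rfl
  | cons s rest ih => simp [capitalizeWords, ih]

-- ===== VERDICT (by name: the statement is the Claim_ definition above) =====
theorem capitalizeWords_spec : Claim_equal_capitalizeWords := by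
  intro arr _
  unfold Spec_capitalizeWords capitalizeWords_alt
  rw [alt_foldl_acc, capA_eq_map]
  simp [pvCapWordB_eq]
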